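-- pv_equiv track=rewrite | github.com/callmekohei/tigaDebugger | rplugin/python3/tigaDebugger/source/sdb.py | cutOutProperly
-- ===== SOURCE A (Python) =====
-- def cutOutProperly(prompt,lst):
--
--     #  (sdb)
--     #      step into
--     #      foo
--     #  (sdb)         <---+
--     #      step out      |
--     #      foo           |
--     #  (sdb)         <---+
--
--     reversed_lst = lst[::-1]
--     cnt = 0
--
--     for s,n in zip(reversed_lst,range(0,len(reversed_lst)-1)):
--         if prompt in s:
--             cnt = cnt + 1
--             if cnt == 2:
--                 return reversed_lst[:n+1][::-1]
--                 break
--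
--     #  Welcome...    <---+
--     #      ...           |
--     #      ...           |
--     #  (sdb)         <---+
--
--     if cnt == 1:
--         return lst
--     else:
--         return None
-- ===== SOURCE B (Python) =====
-- def cutOutProperly(prompt, lst):
--     idxs = [i for i in range(1, len(lst)) if prompt in lst[i]]
--     if len(idxs) >= 2:
--         return lst[idxs[-2]:]
--     if len(idxs) == 1:
--         return lst
--     return None
-- ===== Notes on version B (the rewrite author's own statement) =====
-- stated objective: simpler
-- what changed: Replaces the reversed single pass with a match counter and early return by building the forward list of matching positions once and selecting its second-from-last entry directly.
import Mathlib
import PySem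

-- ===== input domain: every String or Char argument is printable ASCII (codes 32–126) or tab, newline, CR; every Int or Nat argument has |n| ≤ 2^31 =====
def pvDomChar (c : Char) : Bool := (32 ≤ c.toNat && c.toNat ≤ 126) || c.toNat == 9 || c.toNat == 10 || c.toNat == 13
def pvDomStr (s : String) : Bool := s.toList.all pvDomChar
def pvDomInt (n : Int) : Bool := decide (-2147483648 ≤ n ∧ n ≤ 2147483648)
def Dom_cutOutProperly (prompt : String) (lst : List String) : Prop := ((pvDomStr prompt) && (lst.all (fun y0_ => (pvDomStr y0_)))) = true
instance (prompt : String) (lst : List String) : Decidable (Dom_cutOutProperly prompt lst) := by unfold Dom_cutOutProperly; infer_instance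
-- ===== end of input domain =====

-- B builds the forward list of matching positions once and indexes its second-from-last entry,
-- replacing A's reversed scan with a match counter and early return (objective: simpler).


-- ===== PORT A =====
-- the 'for s,n in zip(reversed_lst, range(0, len(reversed_lst)-1))' loop, carrying cnt
def cutOutProperlyGo (prompt : String) (rl lst : List String) :
    List (String × Int) → Int → Option (List String)
  | [], cnt => if cnt = 1 then some lst else none
  | (s, n) :: rest, cnt =>
      if PySem.Str.isIn prompt s then
        -- cnt = cnt + 1; if cnt == 2: return reversed_lst[:n+1][::-1]
        (if cnt + 1 = 2 then some ((PySem.List.slice rl none (some (n + 1))).reverse)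
         else cutOutProperlyGo prompt rl lst rest (cnt + 1))
      else cutOutProperlyGo prompt rl lst rest cnt

def cutOutProperly (prompt : String) (lst : List String) : Option (List String) :=
  let reversed_lst := lst.reverse  -- lst[::-1] (PySem.List.slice?_none_none_neg_one)
  cutOutProperlyGo prompt reversed_lst lst
    (reversed_lst.zip (PySem.List.pyRange 0 ((lst.length : Int) - 1) 1)) 0

-- ===== PORT B =====
def cutOutProperly_alt (prompt : String) (lst : List String) : Option (List String) :=
  let idxs := (PySem.List.pyRange 1 (lst.length : Int) 1).filter
      (fun i => PySem.Str.isIn prompt (PySem.List.pyGetD lst i ""))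
  if 2 ≤ idxs.length then
    some (PySem.List.slice lst (some (PySem.List.pyGetD idxs (-2) 0)) none)
  else if idxs.length = 1 then some lst
  else none

-- ===== PRECONDITION & SPEC =====
def Spec_cutOutProperly (prompt : String) (lst : List String) (out : Option (List String)) : Prop := out = cutOutProperly_alt prompt lst
instance (prompt : String) (lst : List String) (out : Option (List String)) : Decidable (Spec_cutOutProperly prompt lst out) := by unfold Spec_cutOutProperly; infer_instance

-- ===== CLAIM (what is proved, stated in full; the proofs are below) =====
def Claim_equal_cutOutProperly : Prop := ∀ (prompt : String) (lst : List String), Dom_cutOutProperly prompt lst → Spec_cutOutProperly prompt lst (cutOutProperly prompt lst)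

-- ===== LEMMAS AND PROOFS =====

-- forward list of matching positions (as Nats, indices 1..len-1), and a common normal form
def natIdx (prompt : String) (lst : List String) : List Nat :=
  (List.range' 1 (lst.length - 1)).filter (fun i => PySem.Str.isIn prompt (lst.getD i ""))

def coreResult (prompt : String) (lst : List String) : Option (List String) :=
  match (natIdx prompt lst).reverse with
  | [] => none
  | [_] => some lst
  | _ :: b :: _ => some (lst.drop b)

lemma goA_one (prompt : String) (rl lst : List String) (pairs : List (String × Int)) :
    cutOutProperlyGo prompt rl lst pairs 1 =
      match pairs.filter (fun q => PySem.Str.isIn prompt q.1) with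
      | [] => some lst
      | (_, n) :: _ => some ((PySem.List.slice rl none (some (n + 1))).reverse) := by
  induction pairs with
  | nil => simp [cutOutProperlyGo]
  | cons q rest ih =>
      obtain ⟨s, n⟩ := q
      simp only [cutOutProperlyGo, List.filter_cons]
      by_cases h : PySem.Str.isIn prompt s = true
      · rw [if_pos h, if_pos h]
        norm_num
      · rw [if_neg h, if_neg h, ih]

lemma goA_zero (prompt : String) (rl lst : List String) (pairs : List (String × Int)) :
    cutOutProperlyGo prompt rl lst pairs 0 =
      match pairs.filter (fun q => PySem.Str.isIn prompt q.1) with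
      | [] => none
      | [_] => some lst
      | _ :: (_, n) :: _ => some ((PySem.List.slice rl none (some (n + 1))).reverse) := by
  induction pairs with
  | nil => simp [cutOutProperlyGo]
  | cons q rest ih =>
      obtain ⟨s, n⟩ := q
      simp only [cutOutProperlyGo, List.filter_cons]
      by_cases h : PySem.Str.isIn prompt s = true
      · rw [if_pos h, if_pos h]
        norm_num
        rw [goA_one]
        cases hf : rest.filter (fun q => PySem.Str.isIn prompt q.1) with
        | nil =>
            simp only [PySem.Str.isIn_eq] at hf
            rw [hf]
        | cons b t =>
            obtain ⟨s', n'⟩ := b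
            simp only [PySem.Str.isIn_eq] at hf
            rw [hf]
      · rw [if_neg h, if_neg h, ih]

-- zip with an index range is a map over the range
lemma zip_map_range (xs : List String) (m : Nat) (h : m ≤ xs.length) :
    xs.zip (List.map (Nat.cast : Nat → Int) (List.range m)) =
      (List.range m).map (fun j => (xs.getD j "", (j : Int))) := by
  apply List.ext_getElem
  · simp [h]
  · intro i h1' h2
    have h1 : i < xs.length ∧ i < m := by simpa using h1'
    rw [List.getElem_zip, List.getElem_map, List.getElem_map, List.getElem_range]
    simp [List.getElem?_eq_getElem h1.1]


lemma map_range_sub (m : Nat) : (List.range m).map (fun j => m - j) = (List.range' 1 m).reverse := by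
  apply List.ext_getElem
  · simp
  · intro i h1 h2
    simp at h1
    simp [List.getElem_reverse, List.getElem_range']
    omega

-- reversal of a filtered 1-based range
lemma filter_range_rev (m : Nat) (q : Nat → Bool) :
    (((List.range' 1 m).filter q).reverse).map (fun i => m - i) =
      (List.range m).filter (fun j => q (m - j)) := by
  rw [← List.filter_reverse, ← map_range_sub, List.filter_map, List.map_map]
  simp only [Function.comp_def]
  have h' : ∀ j ∈ (List.range m).filter (fun j => q (m - j)), m - (m - j) = j := by
    intro j hj
    have : j < m := List.mem_range.mp (List.mem_filter.mp hj).1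
    omega
  exact (List.map_congr_left h').trans (by simp)

lemma take_reverse_reverse (xs : List String) (k : Nat) :
    (xs.reverse.take k).reverse = xs.drop (xs.length - k) := by
  rw [List.take_reverse, List.reverse_reverse]

lemma mem_natIdx (prompt : String) (lst : List String) (b : Nat) (h : b ∈ natIdx prompt lst) :
    1 ≤ b ∧ b < lst.length := by
  have := (List.mem_filter.mp h).1
  have := List.mem_range'.mp this
  omega

-- A reduces to the common normal form
lemma A_eq_core (prompt : String) (lst : List String) :
    cutOutProperly prompt lst = coreResult prompt lst := by
  have hr : PySem.List.pyRange 0 ((lst.length : Int) - 1) 1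
      = List.map (Nat.cast : Nat → Int) (List.range (lst.length - 1)) := by
    rw [PySem.List.pyRange_one]
    have ht : ((lst.length : Int) - 1 - 0).toNat = lst.length - 1 := by omega
    rw [ht]
    apply List.map_congr_left
    intro k hk
    simp
  simp only [cutOutProperly]
  rw [hr, zip_map_range lst.reverse (lst.length - 1) (by simp), goA_zero,
      List.filter_map]
  simp only [Function.comp_def]
  have hpred : (List.range (lst.length - 1)).filter
        (fun j => PySem.Str.isIn prompt ((lst.reverse.getD j "", (j : Int)).1))
      = (List.range (lst.length - 1)).filter
        (fun j => PySem.Str.isIn prompt (lst.getD (lst.length - 1 - j) "")) := by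
    apply List.filter_congr
    intro j hj
    have hj' : j < lst.length - 1 := List.mem_range.mp hj
    have hrev : lst.reverse.getD j "" = lst.getD (lst.length - 1 - j) "" := by
      rw [List.getD_eq_getElem _ _ (by simp; omega), List.getD_eq_getElem _ _ (by omega),
          List.getElem_reverse]
    simp only [hrev]
  rw [hpred, ← filter_range_rev (lst.length - 1)
        (fun i => PySem.Str.isIn prompt (lst.getD i "")), List.map_map]
  rw [show (List.range' 1 (lst.length - 1)).filter
        (fun i => PySem.Str.isIn prompt (lst.getD i "")) = natIdx prompt lst from rfl]
  unfold coreResult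
  cases hR : (natIdx prompt lst).reverse with
  | nil => rfl
  | cons a R' =>
      cases R' with
      | nil => rfl
      | cons b t =>
          simp only [List.map_cons]
          have hb : 1 ≤ b ∧ b < lst.length := by
            apply mem_natIdx prompt lst
            have : b ∈ (natIdx prompt lst).reverse := by rw [hR]; simp
            simpa using this
          simp only [Function.comp_def]
          have e1 : ((lst.length - 1 - b : Nat) : Int) + 1 = ((lst.length - b : Nat) : Int) := by
            omega
          rw [e1, PySem.List.slice_to_natCast,
              take_reverse_reverse lst (lst.length - b)]
          have e2 : lst.length - (lst.length - b) = b := by omega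
          rw [e2]

-- B reduces to the common normal form
lemma B_eq_core (prompt : String) (lst : List String) :
    cutOutProperly_alt prompt lst = coreResult prompt lst := by
  have hrange : PySem.List.pyRange 1 (lst.length : Int) 1
      = List.map (Nat.cast : Nat → Int) (List.range' 1 (lst.length - 1)) := by
    rw [PySem.List.pyRange_one]
    have ht : ((lst.length : Int) - 1).toNat = lst.length - 1 := by omega
    rw [ht, List.range'_eq_map_range, List.map_map]
    apply List.map_congr_left
    intro k hk
    simp
  simp only [cutOutProperly_alt]
  rw [hrange, List.filter_map]
  simp only [Function.comp_def, PySem.List.pyGetD_natCast]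
  unfold coreResult natIdx
  set L := (List.range' 1 (lst.length - 1)).filter
      (fun i => PySem.Str.isIn prompt (lst.getD i "")) with hL
  rw [List.length_map]
  by_cases h2 : 2 ≤ L.length
  · rw [if_pos h2]
    have hg : PySem.List.pyGetD (List.map (Nat.cast : Nat → Int) L) (-2) 0
        = ((L[L.length - 2]'(by omega) : Nat) : Int) := by
      rw [PySem.List.pyGetD_neg_ofNat _ 2 0 (by omega) (by simp; omega)]
      simp
    rw [hg, PySem.List.slice_from_natCast]
    cases hR : L.reverse with
    | nil =>
        exfalso
        have hlen : L.length = 0 := by simpa using congrArg List.length hR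
        omega
    | cons a R' =>
        cases R' with
        | nil =>
            exfalso
            have hlen : L.length = 1 := by simpa using congrArg List.length hR
            omega
        | cons b t =>
            have hb? : L[L.length - 2]? = some b := by
              have h1lt : 1 < L.reverse.length := by rw [hR]; simp
              have : L.reverse[1]? = some b := by rw [hR]; rfl
              rw [List.getElem?_reverse (by simpa using h1lt)] at this
              have hidx : L.length - 1 - 1 = L.length - 2 := by omega
              rw [hidx] at this
              exact this
            have hbe : L[L.length - 2]'(by omega) = b := by
              have := List.getElem?_eq_getElem (l := L) (i := L.length - 2) (by omega)
              rw [hb?] at this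
              exact (Option.some_injective _ this.symm)
            rw [hbe]
  · rw [if_neg h2]
    by_cases h1 : L.length = 1
    · rw [if_pos h1]
      cases hR : L.reverse with
      | nil =>
          exfalso
          have hlen : L.length = 0 := by simpa using congrArg List.length hR
          omega
      | cons a R' =>
          cases R' with
          | nil => rfl
          | cons b t =>
              exfalso
              have hlen : L.length = t.length + 2 := by simpa using congrArg List.length hR
              omega
    · rw [if_neg h1]
      have hnil : L.reverse = [] := by
        have : L.length = 0 := by omega
        simp [List.length_eq_zero_iff.mp this]
      rw [hnil]

-- ===== VERDICT (by name: the statement is the Claim_ definition above) =====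
theorem cutOutProperly_spec : Claim_equal_cutOutProperly := by
  intro prompt lst _
  unfold Spec_cutOutProperly
  rw [A_eq_core, B_eq_core]
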